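-- pv_equiv track=rewrite | github.com/Biolexey/- | 2011/win.py | has2
-- ===== SOURCE A (Python) =====
-- def get_revmark(mark):
--     if mark == "O":
--         return "X"
--     elif mark == "X":
--         return "O"
--     else:
--         return "-"
--
-- def has2(txt, mark):
--     tmp = 0
--     revm = get_revmark(mark)
--     for m in txt:
--         if m == revm:
--             return False
--         elif m == mark:
--             tmp += 1
--     return tmp >= 2
-- ===== SOURCE B (Python) =====
-- def get_revmark(mark):
--     if mark == "O":
--         return "X"
--     elif mark == "X":
--         return "O"
--     else:
--         return "-"
--
-- def has2(txt, mark):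
--     chars = list(txt)
--     return chars.count(get_revmark(mark)) == 0 and chars.count(mark) >= 2
-- ===== Notes on version B (the rewrite author's own statement) =====
-- stated objective: simpler
-- what changed: Replaces the early-exiting accumulating loop by a closed-form boolean over two list.count scans of list(txt): no opposite mark present and at least two occurrences of mark.
import Mathlib
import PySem

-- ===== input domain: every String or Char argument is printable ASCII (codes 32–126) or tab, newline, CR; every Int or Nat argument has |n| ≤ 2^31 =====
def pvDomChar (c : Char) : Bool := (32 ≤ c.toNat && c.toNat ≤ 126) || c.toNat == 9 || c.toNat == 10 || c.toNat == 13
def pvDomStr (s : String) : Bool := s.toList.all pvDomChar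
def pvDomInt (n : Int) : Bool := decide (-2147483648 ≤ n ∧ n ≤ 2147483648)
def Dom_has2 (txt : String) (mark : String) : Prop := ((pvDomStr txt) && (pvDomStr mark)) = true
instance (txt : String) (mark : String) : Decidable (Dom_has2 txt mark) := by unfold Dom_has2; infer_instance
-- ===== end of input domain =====

-- B replaces A's early-exiting accumulating loop by a closed-form boolean over two
-- list.count scans of list(txt) (objective: simpler).


-- ===== PORT A =====
def get_revmark (mark : String) : String :=
  if mark == "O" then "X"
  else if mark == "X" then "O"
  else "-"

-- the for-loop of A: iterate over the characters (as one-char strings), early return on revm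
def has2Loop (revm mark : String) : List Char → Int → Bool
  | [], tmp => decide (tmp ≥ 2)
  | c :: rest, tmp =>
    if String.ofList [c] == revm then false
    else if String.ofList [c] == mark then has2Loop revm mark rest (tmp + 1)
    else has2Loop revm mark rest tmp

def has2 (txt : String) (mark : String) : Bool :=
  has2Loop (get_revmark mark) mark txt.toList 0

-- ===== PORT B =====
def has2_alt (txt : String) (mark : String) : Bool :=
  let chars := txt.toList.map (fun c => String.ofList [c])   -- list(txt)
  (PySem.List.count chars (get_revmark mark) == 0) && decide (PySem.List.count chars mark ≥ 2)

-- ===== PRECONDITION & SPEC =====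
def Spec_has2 (txt : String) (mark : String) (out : Bool) : Prop := out = has2_alt txt mark
instance (txt : String) (mark : String) (out : Bool) : Decidable (Spec_has2 txt mark out) := by unfold Spec_has2; infer_instance

-- ===== CLAIM (what is proved, stated in full; the proofs are below) =====
def Claim_equal_has2 : Prop := ∀ (txt : String) (mark : String), Dom_has2 txt mark → Spec_has2 txt mark (has2 txt mark)

-- ===== LEMMAS AND PROOFS =====

-- loop invariant: the early-exit loop equals the counts-based formula
theorem has2Loop_eq (revm mark : String) (l : List Char) (tmp : Int) :
    has2Loop revm mark l tmp =
      (((l.map (fun c => String.ofList [c])).count revm == 0) &&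
        decide (tmp + ((l.map (fun c => String.ofList [c])).count mark : Int) ≥ 2)) := by
  induction l generalizing tmp with
  | nil => simp [has2Loop]
  | cons c rest ih =>
    simp only [has2Loop, List.map_cons]
    by_cases h1 : String.ofList [c] == revm
    · simp [List.count_cons, beq_iff_eq.mp h1]
    · by_cases h2 : String.ofList [c] == mark
      · rw [if_neg (by simp [h1]), if_pos h2, ih]
        simp only [List.count_cons, h1, h2, if_true]
        congr 1
        rw [decide_eq_decide]
        push_cast
        omega
      · rw [if_neg (by simp [h1]), if_neg (by simp [h2]), ih]
        simp [List.count_cons, h1, h2]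

theorem count_eq_pycount {α : Type} [BEq α] (l : List α) (v : α) :
    PySem.List.count l v = l.count v := by
  simp [PySem.List.count_eq]

-- ===== VERDICT (by name: the statement is the Claim_ definition above) =====
theorem has2_spec : Claim_equal_has2 := by
  intro txt mark _
  unfold Spec_has2 has2 has2_alt
  rw [has2Loop_eq]
  simp only [count_eq_pycount, zero_add]
  congr 1
  rw [decide_eq_decide]
  omega
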